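-- pv_equiv track=rewrite | github.com/cirosantilli/project-euler-solutions | solvers/830.py | forward_differences_of_powers
-- ===== SOURCE A (Python) =====
-- def forward_differences_of_powers(n: int, J: int, mod: int) -> list[int]:
--     """
--     Computes F[j] = Δ^j f(0) modulo mod for f(i) = i^n, 0<=j<=J,
--     using an in-place forward-difference table.
--
--     Identity used: Δ^j (i^n)|_{i=0} = sum_{t=0..j} (-1)^(j-t) * C(j,t) * t^n = j! * S(n,j),
--     where S(n,j) is a Stirling number of the second kind.
--     """
--     arr = [0] * (J + 1)
--     if n == 0:
--         # 0^0 is taken as 1 in the original sum; here f(0)=0^0=1, f(i)=i^0=1 for i>0.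
--         for i in range(J + 1):
--             arr[i] = 1 % mod
--     else:
--         arr[0] = 0
--         for i in range(1, J + 1):
--             arr[i] = pow(i, n, mod)
--
--     F = [0] * (J + 1)
--     for j in range(J + 1):
--         F[j] = arr[0] % mod
--         # next difference level
--         for i in range(J - j):
--             arr[i] = (arr[i + 1] - arr[i]) % mod
--     return F
-- ===== SOURCE B (Python) =====
-- def forward_differences_of_powers(n: int, J: int, mod: int) -> list[int]:
--     # Binomial transform: F[j] = sum_{t=0..j} (-1)^(j-t) * C(j,t) * t^n  (mod `mod`),
--     # with Pascal's triangle rows built incrementally (kept reduced mod `mod`).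
--     p = [pow(t, n, mod) for t in range(J + 1)]
--     F = []
--     row = [1 % mod]
--     for j in range(J + 1):
--         s = 0
--         for t in range(j + 1):
--             term = row[t] * p[t]
--             s = (s + term if (j - t) % 2 == 0 else s - term) % mod
--         F.append(s)
--         row = [1 % mod] + [(row[t] + row[t + 1]) % mod for t in range(j)] + [1 % mod]
--     return F
-- ===== Notes on version B (the rewrite author's own statement) =====
-- stated objective: alternative
-- what changed: Replaces the cascading in-place forward-difference table (each row overwriting the previous one) by a direct binomial-transform: a power table p[t]=pow(t,n,mod) plus, per output index j, a signed sum over Pascal's-triangle row C(j,t) built incrementally and kept reduced mod `mod`.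
-- outside the precondition, e.g. on forward_differences_of_powers(-1, 1, 5): A returns [0, 1], B raises ValueError; on forward_differences_of_powers(0, -1, 0): A returns [], B raises ZeroDivisionError
import Mathlib
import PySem

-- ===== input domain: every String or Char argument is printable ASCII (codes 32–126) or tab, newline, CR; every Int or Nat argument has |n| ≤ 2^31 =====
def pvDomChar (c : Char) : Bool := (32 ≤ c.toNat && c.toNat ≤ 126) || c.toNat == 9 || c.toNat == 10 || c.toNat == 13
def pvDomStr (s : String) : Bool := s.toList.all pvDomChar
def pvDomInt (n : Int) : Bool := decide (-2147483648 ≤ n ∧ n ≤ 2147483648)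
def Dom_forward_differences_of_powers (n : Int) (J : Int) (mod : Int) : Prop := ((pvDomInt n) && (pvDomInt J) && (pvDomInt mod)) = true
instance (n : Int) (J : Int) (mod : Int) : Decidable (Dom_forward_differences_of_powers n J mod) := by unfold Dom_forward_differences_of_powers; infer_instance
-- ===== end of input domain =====

-- B replaces A's cascading in-place difference table by a binomial-transform sum over
-- incrementally built Pascal rows (same cost, different algorithm; objective: alternative).

-- ===== PORT A =====
def forward_differences_of_powers (n : Int) (J : Int) (mod : Int) : List Int :=
  let arr0 : List Int := List.replicate (J + 1).toNat 0
  let arr1 : List Int :=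
    if n = 0 then
      (PySem.List.pyRange 0 (J + 1) 1).foldl
        (fun arr i => arr.set i.toNat (PySem.Int.mod 1 mod)) arr0
    else
      (PySem.List.pyRange 1 (J + 1) 1).foldl
        (fun arr i => arr.set i.toNat (PySem.Int.powMod i n.toNat mod)) (arr0.set 0 0)
  let F0 : List Int := List.replicate (J + 1).toNat 0
  let st := (PySem.List.pyRange 0 (J + 1) 1).foldl
    (fun (st : List Int × List Int) j =>
      let F := st.1.set j.toNat (PySem.Int.mod (st.2.getD 0 0) mod)   -- arr[0]; in range on Pre_
      let arr := (PySem.List.pyRange 0 (J - j) 1).foldl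
        (fun a i => a.set i.toNat
          (PySem.Int.mod (a.getD (i.toNat + 1) 0 - a.getD i.toNat 0) mod)) st.2  -- indices in range
      (F, arr)) (F0, arr1)
  st.1

-- ===== PORT B =====
def forward_differences_of_powers_alt (n : Int) (J : Int) (mod : Int) : List Int :=
  let p : List Int := (PySem.List.pyRange 0 (J + 1) 1).map
    (fun t => PySem.Int.powMod t n.toNat mod)
  let st := (PySem.List.pyRange 0 (J + 1) 1).foldl
    (fun (st : List Int × List Int) j =>
      let s := (PySem.List.pyRange 0 (j + 1) 1).foldl
        (fun s t =>
          let term := st.2.getD t.toNat 0 * p.getD t.toNat 0   -- row[t] * p[t]; in range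
          PySem.Int.mod (if PySem.Int.mod (j - t) 2 = 0 then s + term else s - term) mod) 0
      let row := [PySem.Int.mod 1 mod]
        ++ (PySem.List.pyRange 0 j 1).map
           (fun t => PySem.Int.mod (st.2.getD t.toNat 0 + st.2.getD (t.toNat + 1) 0) mod)
        ++ [PySem.Int.mod 1 mod]
      (st.1 ++ [s], row))
    ([], [PySem.Int.mod 1 mod])
  st.1

-- ===== PRECONDITION & SPEC =====
-- Pre_ excludes: mod = 0 ('1 % mod' / 'F[j] % mod' raise ZeroDivisionError); n < 0, where pow()
-- performs modular inversion (A raises ValueError whenever some base 2..J is not invertible, and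
-- B's uniform power table hits the non-invertible base 0 and raises); and n ≠ 0 with J < 0,
-- where A raises IndexError (it assigns arr[0] = 0 on the empty table) while B would return [].
def Pre_forward_differences_of_powers (n : Int) (J : Int) (mod : Int) : Prop :=
  0 ≤ n ∧ mod ≠ 0 ∧ (0 ≤ J ∨ n = 0)
instance (n : Int) (J : Int) (mod : Int) : Decidable (Pre_forward_differences_of_powers n J mod) := by
  unfold Pre_forward_differences_of_powers; infer_instance
def pvWitness_forward_differences_of_powers : Int × Int × Int := (2, 3, 5)

def Spec_forward_differences_of_powers (n : Int) (J : Int) (mod : Int) (out : List Int) : Prop := out = forward_differences_of_powers_alt n J mod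
instance (n : Int) (J : Int) (mod : Int) (out : List Int) : Decidable (Spec_forward_differences_of_powers n J mod out) := by unfold Spec_forward_differences_of_powers; infer_instance

-- ===== CLAIM (what is proved, stated in full; the proofs are below) =====
def Claim_equal_forward_differences_of_powers : Prop := ∀ (n : Int) (J : Int) (mod : Int), Dom_forward_differences_of_powers n J mod → Pre_forward_differences_of_powers n J mod → Spec_forward_differences_of_powers n J mod (forward_differences_of_powers n J mod)

-- ===== LEMMAS AND PROOFS =====

-- `%` congruence toolkit for Python's mod (= Int.fmod, sign of the divisor)
lemma pv_dvd_sub_mod (a m : Int) : m ∣ a - PySem.Int.mod a m :=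
  ⟨PySem.Int.floordiv a m, by
    have h := PySem.Int.floordiv_mul_add_mod a m
    linarith [mul_comm (PySem.Int.floordiv a m) m]⟩

lemma pv_mod_congr {m : Int} (hm : m ≠ 0) {a b : Int} (h : m ∣ a - b) :
    PySem.Int.mod a m = PySem.Int.mod b m := by
  obtain ⟨qa, hqa⟩ := pv_dvd_sub_mod a m
  obtain ⟨qb, hqb⟩ := pv_dvd_sub_mod b m
  obtain ⟨k, hk⟩ := h
  have hd : PySem.Int.mod a m - PySem.Int.mod b m = m * (k - qa + qb) := by ring_nf; linarith
  have habs : |PySem.Int.mod a m - PySem.Int.mod b m| < |m| := by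
    rcases lt_or_gt_of_ne hm with hneg | hpos
    · have h1 := PySem.Int.mod_neg_bounds a (b := m) hneg
      have h2 := PySem.Int.mod_neg_bounds b (b := m) hneg
      rw [abs_lt, abs_of_neg hneg]; omega
    · have h1 := PySem.Int.mod_nonneg a (b := m) hpos
      have h2 := PySem.Int.mod_lt a (b := m) hpos
      have h3 := PySem.Int.mod_nonneg b (b := m) hpos
      have h4 := PySem.Int.mod_lt b (b := m) hpos
      rw [abs_lt, abs_of_pos hpos]; omega
  rw [hd] at habs
  have hz : k - qa + qb = 0 := by
    by_contra hne
    have h1 : (1 : Int) ≤ |k - qa + qb| := Int.one_le_abs (by omega)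
    have h2 : |m| * 1 ≤ |m| * |k - qa + qb| :=
      mul_le_mul_of_nonneg_left h1 (abs_nonneg m)
    rw [abs_mul] at habs; omega
  have : PySem.Int.mod a m - PySem.Int.mod b m = 0 := by rw [hd, hz, mul_zero]
  omega

lemma pv_dvd_of_mod_eq {m : Int} {a b : Int}
    (h : PySem.Int.mod a m = PySem.Int.mod b m) : m ∣ a - b := by
  have ha := pv_dvd_sub_mod a m
  have hb := pv_dvd_sub_mod b m
  have hab : a - b = (a - PySem.Int.mod a m) - (b - PySem.Int.mod b m) := by rw [h]; ring
  rw [hab]; exact dvd_sub ha hb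

lemma pv_mod_sub_congr {m : Int} (hm : m ≠ 0) {a b a' b' : Int}
    (ha : PySem.Int.mod a m = PySem.Int.mod a' m) (hb : PySem.Int.mod b m = PySem.Int.mod b' m) :
    PySem.Int.mod (a - b) m = PySem.Int.mod (a' - b') m := by
  apply pv_mod_congr hm
  have h1 := pv_dvd_of_mod_eq ha
  have h2 := pv_dvd_of_mod_eq hb
  have hr : a - b - (a' - b') = (a - a') - (b - b') := by ring
  rw [hr]; exact dvd_sub h1 h2

lemma pv_mod_mod {m : Int} (hm : m ≠ 0) (a : Int) :
    PySem.Int.mod (PySem.Int.mod a m) m = PySem.Int.mod a m := by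
  apply pv_mod_congr hm
  have h := pv_dvd_sub_mod a m
  simpa using dvd_neg.mpr h

@[simp] lemma pv_toNat_succ (k : Nat) : ((k : Int) + 1).toNat = k + 1 := by omega

-- the power-table entry both programs use: pow(t, n, mod) at a nonnegative index t
def pvPf (n mod : Int) (t : Nat) : Int := PySem.Int.powMod (t : Int) n.toNat mod

-- A's table value after j difference levels, reduced mod `mod` at every level
def pvGm (n mod : Int) : Nat → Nat → Int
  | 0, i => pvPf n mod i
  | j+1, i => PySem.Int.mod (pvGm n mod j (i+1) - pvGm n mod j i) mod

-- B's binomial-transform sum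
def pvSig (n mod : Int) (j : Nat) : Int :=
  ∑ t ∈ Finset.range (j + 1), ((-1 : ℤ) ^ (j - t) * (j.choose t : ℤ)) * pvPf n mod t

lemma pv_foldl_congr {α β : Type} {f g : β → α → β} :
    ∀ (l : List α) (a : β), (∀ b x, x ∈ l → f b x = g b x) → l.foldl f a = l.foldl g a := by
  intro l
  induction l with
  | nil => intro a _; rfl
  | cons x xs ih =>
    intro a h
    simp only [List.foldl_cons]
    rw [h a x (by simp)]
    exact ih _ (fun b y hy => h b y (by simp [hy]))

-- set at the junction point of an append
lemma pv_set_append (l1 l2 : List Int) (v : Int) :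
    (l1 ++ l2).set l1.length v = l1 ++ l2.set 0 v := by
  induction l1 with
  | nil => rfl
  | cons x xs ih => simp [ih]

-- an ascending fill loop writes a map over the written segment
lemma pv_fill (v : Nat → Int) (a : Nat) : ∀ (m : Nat) (arr : List Int), a + m ≤ arr.length →
    (List.range m).foldl (fun ar t => ar.set (a + t) (v t)) arr
    = arr.take a ++ (List.range m).map v ++ arr.drop (a + m) := by
  intro m
  induction m with
  | zero => intro arr h; simp
  | succ m ih =>
    intro arr h
    rw [List.range_succ (n := m), List.foldl_append, ih arr (by omega)]
    simp only [List.foldl_cons, List.foldl_nil]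
    have hlen : (arr.take a ++ (List.range m).map v).length = a + m := by
      simp [List.length_take, Nat.min_eq_left (by omega : a ≤ arr.length)]
    have hlt : a + m < arr.length := by omega
    have hdrop : arr.drop (a + m) = arr[a + m] :: arr.drop (a + m + 1) :=
      List.drop_eq_getElem_cons hlt
    rw [hdrop]
    have hsa := pv_set_append (arr.take a ++ (List.range m).map v)
      (arr[a + m] :: arr.drop (a + m + 1)) (v m)
    rw [hlen] at hsa
    rw [hsa, List.set_cons_zero]
    simp [List.map_append, List.append_assoc]
    omega

lemma pv_mod_zero_eq (mod : Int) : PySem.Int.mod 0 mod = 0 :=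
  (PySem.Int.mod_eq_zero_iff_dvd 0 mod).mpr (dvd_zero mod)

-- A's filled initial table, n = 0 branch
lemma pv_arr1_zero (J mod : Int) :
    (PySem.List.pyRange 0 (J + 1) 1).foldl
      (fun arr i => arr.set i.toNat (PySem.Int.mod 1 mod))
      (List.replicate (J + 1).toNat 0)
    = (List.range (J + 1).toNat).map (pvPf 0 mod) := by
  rw [PySem.List.pyRange_one, List.foldl_map]
  simp only [zero_add, Int.toNat_natCast, sub_zero]
  have h := pv_fill (fun _ => PySem.Int.mod 1 mod) 0 (J + 1).toNat
    (List.replicate (J + 1).toNat (0 : Int)) (by simp)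
  simp only [zero_add, List.take_zero, List.nil_append] at h
  rw [h, List.drop_replicate]
  simp only [Nat.sub_self, List.replicate_zero, List.append_nil]
  apply List.map_congr_left
  intro t _
  simp [pvPf, PySem.Int.powMod]

-- A's filled initial table, n > 0 branch
lemma pv_arr1_pos (n J mod : Int) (hn : 0 < n) :
    (PySem.List.pyRange 1 (J + 1) 1).foldl
      (fun arr i => arr.set i.toNat (PySem.Int.powMod i n.toNat mod))
      ((List.replicate (J + 1).toNat 0).set 0 0)
    = (List.range (J + 1).toNat).map (pvPf n mod) := by
  rcases lt_or_ge J 0 with hJ | hJ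
  · have h0 : (J + 1).toNat = 0 := by omega
    rw [PySem.List.pyRange_one_eq_nil (by omega), h0]
    simp
  · have hK : (J + 1).toNat = J.toNat + 1 := by omega
    have hstart : (List.replicate (J + 1).toNat (0 : Int)).set 0 0
        = List.replicate (J + 1).toNat (0 : Int) := by
      rw [hK, List.replicate_succ]; rfl
    rw [hstart, PySem.List.pyRange_one]
    have hJJ : (J + 1 - 1).toNat = J.toNat := by omega
    rw [hJJ]
    have hmap : (List.range J.toNat).map (fun k : Nat => (1 : Int) + (k : Int))
        = (List.range J.toNat).map (fun k : Nat => ((1 + k : Nat) : Int)) := by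
      apply List.map_congr_left; intro k _; push_cast; ring
    rw [hmap, List.foldl_map]
    simp only [Int.toNat_natCast]
    have h := pv_fill (fun t => pvPf n mod (1 + t)) 1 J.toNat
      (List.replicate (J + 1).toNat (0 : Int)) (by simp; omega)
    have hfun : (fun (ar : List Int) (t : Nat) =>
        ar.set (1 + t) (PySem.Int.powMod ((1 + t : Nat) : Int) n.toNat mod))
        = fun ar t => ar.set (1 + t) (pvPf n mod (1 + t)) := rfl
    rw [hfun, h, List.drop_replicate]
    have hd : (J + 1).toNat - (1 + J.toNat) = 0 := by omega
    rw [hd]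
    simp only [List.replicate_zero, List.append_nil]
    have htake : (List.replicate (J + 1).toNat (0 : Int)).take 1 = [0] := by
      rw [hK, List.replicate_succ]; simp
    rw [htake, hK, List.range_succ_eq_map, List.map_cons, List.map_map]
    have h0 : pvPf n mod 0 = 0 := by
      have hnt : n.toNat ≠ 0 := by omega
      simp [pvPf, PySem.Int.powMod, zero_pow hnt, pv_mod_zero_eq]
    rw [h0]
    simp only [List.singleton_append, List.cons.injEq, true_and]
    apply List.map_congr_left
    intro t _
    simp [Function.comp, Nat.succ_eq_add_one, Nat.add_comm]

-- one difference-level pass over the table prefix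
lemma pv_diff (mod : Int) (g : Nat → Int) (c : Nat) (tail : List Int) :
    ∀ m, m ≤ c →
    (List.range m).foldl
      (fun a i => a.set i (PySem.Int.mod (a.getD (i + 1) 0 - a.getD i 0) mod))
      ((List.range (c + 1)).map g ++ tail)
    = (List.range m).map (fun i => PySem.Int.mod (g (i + 1) - g i) mod)
      ++ ((List.range (c + 1)).map g).drop m ++ tail := by
  intro m
  induction m with
  | zero => intro _; simp
  | succ m ih =>
    intro hm
    rw [List.range_succ (n := m), List.foldl_append, ih (by omega)]
    set L := (List.range m).map (fun i => PySem.Int.mod (g (i + 1) - g i) mod) with hL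
    have hlenL : L.length = m := by simp [hL]
    have hget : ∀ k, m + k < c + 1 →
        ((L ++ ((List.range (c + 1)).map g).drop m ++ tail).getD (m + k) 0) = g (m + k) := by
      intro k hk
      rw [List.getD_eq_getElem?_getD, List.append_assoc, List.getElem?_append_right (by omega)]
      rw [hlenL]
      have he : m + k - m = k := by omega
      rw [he, List.getElem?_append_left (by simp; omega), List.getElem?_drop]
      rw [List.getElem?_map, List.getElem?_range (by omega : m + k < c + 1)]
      rfl
    have hg0 : (L ++ ((List.range (c + 1)).map g).drop m ++ tail).getD m 0 = g m := by
      have h := hget 0 (by omega); simpa using h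
    have hg1 : (L ++ ((List.range (c + 1)).map g).drop m ++ tail).getD (m + 1) 0 = g (m + 1) :=
      hget 1 (by omega)
    simp only [List.foldl_cons, List.foldl_nil]
    rw [hg0, hg1]
    have hdropm : ((List.range (c + 1)).map g).drop m
        = g m :: ((List.range (c + 1)).map g).drop (m + 1) := by
      rw [List.drop_eq_getElem_cons (by simp; omega)]
      simp
    rw [List.append_assoc, hdropm]
    have hset := pv_set_append L
      (g m :: (((List.range (c + 1)).map g).drop (m + 1) ++ tail))
      (PySem.Int.mod (g (m + 1) - g m) mod)
    rw [hlenL] at hset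
    rw [show (g m :: ((List.range (c + 1)).map g).drop (m + 1) ++ tail)
        = g m :: (((List.range (c + 1)).map g).drop (m + 1) ++ tail) from rfl, hset]
    simp [hL, List.map_append, List.append_assoc]

-- A's outer loop invariant
lemma pv_outerA (n J mod : Int) :
    ∀ m, m ≤ J.toNat + 1 → ∃ tail : List Int,
    (List.range m).foldl
      (fun (st : List Int × List Int) (jn : Nat) =>
        (st.1.set jn (PySem.Int.mod (st.2.getD 0 0) mod),
         (List.range (J - (jn : Int)).toNat).foldl
           (fun a i => a.set i (PySem.Int.mod (a.getD (i + 1) 0 - a.getD i 0) mod)) st.2))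
      (List.replicate (J.toNat + 1) 0, (List.range (J.toNat + 1)).map (pvPf n mod))
    = ((List.range m).map (fun j => PySem.Int.mod (pvGm n mod j 0) mod)
         ++ List.replicate (J.toNat + 1 - m) 0,
       (List.range (J.toNat + 1 - m)).map (pvGm n mod m) ++ tail) := by
  intro m
  induction m with
  | zero =>
    intro _
    refine ⟨[], ?_⟩
    simp [pvGm]
  | succ m ih =>
    intro hm
    obtain ⟨tail, htail⟩ := ih (by omega)
    rw [List.range_succ (n := m), List.foldl_append, htail]
    simp only [List.foldl_cons, List.foldl_nil]
    have hKm : J.toNat + 1 - m = (J.toNat - m) + 1 := by omega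
    have hcJ : (J - (m : Int)).toNat = J.toNat - m := by omega
    refine ⟨pvGm n mod m (J.toNat - m) :: tail, ?_⟩
    rw [Prod.mk.injEq]
    constructor
    · -- F component
      have hlen : ((List.range m).map (fun j => PySem.Int.mod (pvGm n mod j 0) mod)).length = m := by
        simp
      have hrep : List.replicate (J.toNat + 1 - m) (0 : Int)
          = 0 :: List.replicate (J.toNat + 1 - (m + 1)) (0 : Int) := by
        rw [hKm]
        simp only [List.replicate_succ, List.cons.injEq, true_and]
        congr 1
        omega
      have hget0 : ((List.range (J.toNat + 1 - m)).map (pvGm n mod m) ++ tail).getD 0 0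
          = pvGm n mod m 0 := by
        rw [hKm, List.range_succ_eq_map]
        simp
      rw [hget0, hrep]
      have hset := pv_set_append ((List.range m).map (fun j => PySem.Int.mod (pvGm n mod j 0) mod))
        (0 :: List.replicate (J.toNat + 1 - (m + 1)) (0 : Int))
        (PySem.Int.mod (pvGm n mod m 0) mod)
      rw [hlen] at hset
      rw [hset]
      simp [List.map_append, List.append_assoc]
    · -- arr component
      rw [hcJ, hKm]
      have h := pv_diff mod (pvGm n mod m) (J.toNat - m) tail (J.toNat - m) (le_refl _)
      rw [h]
      have hdleft : ∀ (A : List Int) (x : Int), A.length = J.toNat - m →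
          (A ++ [x]).drop (J.toNat - m) = [x] := by
        intro A x hA; rw [← hA, List.drop_left]
      have hdrop : ((List.range ((J.toNat - m) + 1)).map (pvGm n mod m)).drop (J.toNat - m)
          = [pvGm n mod m (J.toNat - m)] := by
        rw [List.range_succ (n := J.toNat - m), List.map_append]
        simp only [List.map_cons, List.map_nil]
        exact hdleft _ _ (by simp)
      rw [hdrop]
      have hfun : (List.range (J.toNat - m)).map
            (fun i => PySem.Int.mod (pvGm n mod m (i + 1) - pvGm n mod m i) mod)
          = (List.range (J.toNat - m)).map (pvGm n mod (m + 1)) := by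
        apply List.map_congr_left; intro i _; simp [pvGm]
      rw [hfun]
      have he : J.toNat + 1 - (m + 1) = J.toNat - m := by omega
      rw [he]
      simp

-- characterization of port A
lemma pv_Achar (n J mod : Int) (hn : 0 ≤ n) :
    forward_differences_of_powers n J mod
    = (List.range (J + 1).toNat).map (fun j => PySem.Int.mod (pvGm n mod j 0) mod) := by
  rcases lt_or_ge J 0 with hJ | hJ
  · have h0 : (J + 1).toNat = 0 := by omega
    simp only [forward_differences_of_powers]
    rw [PySem.List.pyRange_one_eq_nil (by omega : J + 1 ≤ 0), h0]
    simp
  · have hK : (J + 1).toNat = J.toNat + 1 := by omega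
    have harr1 : (if n = 0 then
        (PySem.List.pyRange 0 (J + 1) 1).foldl
          (fun arr i => arr.set i.toNat (PySem.Int.mod 1 mod))
          (List.replicate (J + 1).toNat 0)
      else
        (PySem.List.pyRange 1 (J + 1) 1).foldl
          (fun arr i => arr.set i.toNat (PySem.Int.powMod i n.toNat mod))
          ((List.replicate (J + 1).toNat 0).set 0 0))
        = (List.range (J + 1).toNat).map (pvPf n mod) := by
      by_cases h0 : n = 0
      · subst h0; rw [if_pos rfl]; exact pv_arr1_zero J mod
      · rw [if_neg h0]; exact pv_arr1_pos n J mod (by omega)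
    simp only [forward_differences_of_powers]
    rw [harr1]
    rw [PySem.List.pyRange_one 0 (J + 1), List.foldl_map]
    simp only [PySem.List.pyRange_one, List.foldl_map, zero_add, sub_zero,
      Int.toNat_natCast, hK]
    obtain ⟨tail, htail⟩ := pv_outerA n J mod (J.toNat + 1) (le_refl _)
    rw [htail]
    simp

-- ===== B side =====

-- sign: Python's (j - t) % 2 == 0 test selects (-1)^(j-t)
lemma pv_sign (j t : Nat) (ht : t ≤ j) (s x : Int) :
    (if PySem.Int.mod ((j : Int) - (t : Int)) 2 = 0 then s + x else s - x)
    = s + (-1 : ℤ) ^ (j - t) * x := by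
  have hcast : (j : Int) - (t : Int) = ((j - t : Nat) : Int) := by omega
  rw [hcast, show (2 : Int) = ((2 : Nat) : Int) from rfl, PySem.Int.mod_natCast]
  rcases Nat.even_or_odd (j - t) with he | ho
  · rw [if_pos (by exact_mod_cast congrArg Nat.cast (Nat.even_iff.mp he)), he.neg_one_pow, one_mul]
  · rw [if_neg (by simp [Nat.odd_iff.mp ho]), ho.neg_one_pow]
    ring

-- the accumulating sum loop computes the reduced signed binomial sum
lemma pv_sfold (mod : Int) (hm : mod ≠ 0) (j : Nat) (f : Nat → Int) :
    ∀ k, ∀ s A : Int, PySem.Int.mod s mod = PySem.Int.mod A mod →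
    (List.range k).foldl
      (fun s t => PySem.Int.mod
        (s + (-1 : ℤ) ^ (j - t) * (PySem.Int.mod (j.choose t : Int) mod * f t)) mod) s
    = if k = 0 then s
      else PySem.Int.mod (A + ∑ t ∈ Finset.range k, ((-1 : ℤ) ^ (j - t) * (j.choose t : ℤ)) * f t) mod := by
  intro k
  induction k with
  | zero => intro s A _; simp
  | succ k ih =>
    intro s A hsA
    rw [List.range_succ (n := k), List.foldl_append, ih s A hsA]
    simp only [List.foldl_cons, List.foldl_nil]
    have hprev : PySem.Int.mod (if k = 0 then s
        else PySem.Int.mod (A + ∑ t ∈ Finset.range k, ((-1 : ℤ) ^ (j - t) * (j.choose t : ℤ)) * f t) mod) mod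
        = PySem.Int.mod (A + ∑ t ∈ Finset.range k, ((-1 : ℤ) ^ (j - t) * (j.choose t : ℤ)) * f t) mod := by
      split_ifs with h0
      · subst h0; simpa using hsA
      · exact pv_mod_mod hm _
    rw [if_neg (Nat.succ_ne_zero k)]
    apply pv_mod_congr hm
    have hstep := pv_dvd_of_mod_eq hprev
    obtain ⟨u, hu⟩ := hstep
    obtain ⟨w, hw⟩ := pv_dvd_sub_mod ((j.choose k : Nat) : Int) mod
    rw [Finset.sum_range_succ]
    refine ⟨u - (-1 : ℤ) ^ (j - k) * w * f k, ?_⟩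
    linear_combination hu - ((-1 : ℤ) ^ (j - k) * f k) * hw

-- B's outer loop invariant: F collects the reduced binomial sums, row is Pascal's row mod `mod`
lemma pv_outerB (n J mod : Int) (hm : mod ≠ 0) (P : List Int)
    (hP : ∀ t, t ≤ J.toNat → P.getD t 0 = pvPf n mod t) :
    ∀ m, m ≤ J.toNat + 1 →
    (List.range m).foldl
      (fun (st : List Int × List Int) (jn : Nat) =>
        (st.1 ++ [(List.range (jn + 1)).foldl
           (fun (s : Int) (tn : Nat) => PySem.Int.mod
             (if PySem.Int.mod ((jn : Int) - (tn : Int)) 2 = 0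
              then s + st.2.getD tn 0 * P.getD tn 0
              else s - st.2.getD tn 0 * P.getD tn 0) mod) 0],
         [PySem.Int.mod 1 mod]
           ++ (List.range jn).map
              (fun (tn : Nat) => PySem.Int.mod (st.2.getD tn 0 + st.2.getD (tn + 1) 0) mod)
           ++ [PySem.Int.mod 1 mod]))
      ([], [PySem.Int.mod 1 mod])
    = ((List.range m).map (fun j => PySem.Int.mod (pvSig n mod j) mod),
       (List.range (m + 1)).map (fun t => PySem.Int.mod ((m.choose t : Nat) : Int) mod)) := by
  intro m
  induction m with
  | zero =>
    intro _
    simp [List.range_succ]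
  | succ m ih =>
    intro hm'
    rw [List.range_succ (n := m), List.foldl_append, ih (by omega)]
    simp only [List.foldl_cons, List.foldl_nil]
    have hrow : ∀ t, t ≤ m →
        ((List.range (m + 1)).map
          (fun t => PySem.Int.mod ((m.choose t : Nat) : Int) mod)).getD t 0
        = PySem.Int.mod ((m.choose t : Nat) : Int) mod := by
      intro t ht
      rw [List.getD_eq_getElem?_getD, List.getElem?_map,
        List.getElem?_range (by omega : t < m + 1)]
      rfl
    rw [Prod.mk.injEq]
    constructor
    · -- F component
      have hcong : (List.range (m + 1)).foldl
          (fun (s : Int) (tn : Nat) => PySem.Int.mod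
            (if PySem.Int.mod ((m : Int) - (tn : Int)) 2 = 0
             then s + ((List.range (m + 1)).map
                (fun t => PySem.Int.mod ((m.choose t : Nat) : Int) mod)).getD tn 0 * P.getD tn 0
             else s - ((List.range (m + 1)).map
                (fun t => PySem.Int.mod ((m.choose t : Nat) : Int) mod)).getD tn 0 * P.getD tn 0) mod) 0
          = (List.range (m + 1)).foldl
            (fun (s : Int) (tn : Nat) => PySem.Int.mod
              (s + (-1 : ℤ) ^ (m - tn) * (PySem.Int.mod ((m.choose tn : Nat) : Int) mod * pvPf n mod tn)) mod) 0 := by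
        apply pv_foldl_congr
        intro s tn htn
        rw [List.mem_range] at htn
        rw [hrow tn (by omega), hP tn (by omega),
          pv_sign m tn (by omega) s (PySem.Int.mod ((m.choose tn : Nat) : Int) mod * pvPf n mod tn)]
      rw [hcong, pv_sfold mod hm m (pvPf n mod) (m + 1) 0 0 rfl,
        if_neg (Nat.succ_ne_zero m)]
      simp [pvSig, List.map_append]
    · -- row component
      have hmapr : (List.range m).map (fun (tn : Nat) => PySem.Int.mod
          (((List.range (m + 1)).map (fun t => PySem.Int.mod ((m.choose t : Nat) : Int) mod)).getD tn 0
           + ((List.range (m + 1)).map (fun t => PySem.Int.mod ((m.choose t : Nat) : Int) mod)).getD (tn + 1) 0) mod)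
          = (List.range m).map (fun tn => PySem.Int.mod ((((m + 1).choose (tn + 1) : Nat)) : Int) mod) := by
        apply List.map_congr_left
        intro tn htn
        rw [List.mem_range] at htn
        rw [hrow tn (by omega), hrow (tn + 1) (by omega)]
        apply pv_mod_congr hm
        obtain ⟨u, hu⟩ := pv_dvd_sub_mod ((m.choose tn : Nat) : Int) mod
        obtain ⟨w, hw⟩ := pv_dvd_sub_mod ((m.choose (tn + 1) : Nat) : Int) mod
        have hch : ((((m + 1).choose (tn + 1) : Nat)) : Int)
            = ((m.choose tn : Nat) : Int) + ((m.choose (tn + 1) : Nat) : Int) := by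
          rw [Nat.choose_succ_succ]; push_cast; ring
        rw [hch]
        exact ⟨-(u + w), by linarith⟩
      rw [hmapr, List.range_succ (n := m + 1), List.map_append, List.range_succ_eq_map,
        List.map_cons, List.map_map]
      simp only [Nat.choose_self, Nat.choose_zero_right, Nat.cast_one, List.map_cons,
        List.map_nil, List.cons_append, List.nil_append, List.cons.injEq, true_and]
      rw [List.append_cancel_right_eq]
      apply List.map_congr_left
      intro tn _
      simp [Function.comp, Nat.succ_eq_add_one]

-- characterization of port B
lemma pv_Bchar (n J mod : Int) (hm : mod ≠ 0) :
    forward_differences_of_powers_alt n J mod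
    = (List.range (J + 1).toNat).map (fun j => PySem.Int.mod (pvSig n mod j) mod) := by
  rcases lt_or_ge J 0 with hJ | hJ
  · have h0 : (J + 1).toNat = 0 := by omega
    simp only [forward_differences_of_powers_alt]
    rw [PySem.List.pyRange_one_eq_nil (by omega : J + 1 ≤ 0), h0]
    simp
  · have hK : (J + 1).toNat = J.toNat + 1 := by omega
    simp only [forward_differences_of_powers_alt]
    simp only [PySem.List.pyRange_one, List.foldl_map, List.map_map, Function.comp_def, zero_add,
      sub_zero, Int.toNat_natCast, pv_toNat_succ, hK]
    have hP : ∀ t, t ≤ J.toNat →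
        ((List.range (J.toNat + 1)).map
          (fun k : Nat => PySem.Int.powMod (k : Int) n.toNat mod)).getD t 0
        = pvPf n mod t := by
      intro t ht
      rw [List.getD_eq_getElem?_getD, List.getElem?_map,
        List.getElem?_range (by omega : t < J.toNat + 1)]
      rfl
    have h := pv_outerB n J mod hm _ hP (J.toNat + 1) (le_refl _)
    rw [h]

-- bridge: A's reduced table value is congruent to the iterated forward difference
lemma pv_gmdG (n mod : Int) (hm : mod ≠ 0) :
    ∀ j i, PySem.Int.mod (pvGm n mod j i) mod
      = PySem.Int.mod ((fwdDiff (1 : ℕ))^[j] (pvPf n mod) i) mod := by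
  intro j
  induction j with
  | zero => intro i; simp [pvGm]
  | succ j ih =>
    intro i
    rw [Function.iterate_succ_apply']
    have hdef : fwdDiff (1 : ℕ) ((fwdDiff (1 : ℕ))^[j] (pvPf n mod)) i
        = (fwdDiff (1 : ℕ))^[j] (pvPf n mod) (i + 1) - (fwdDiff (1 : ℕ))^[j] (pvPf n mod) i := rfl
    rw [hdef]
    show PySem.Int.mod (PySem.Int.mod (pvGm n mod j (i + 1) - pvGm n mod j i) mod) mod = _
    rw [pv_mod_mod hm]
    exact pv_mod_sub_congr hm (ih (i + 1)) (ih i)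

lemma pv_bridge (n mod : Int) (hm : mod ≠ 0) (j : Nat) :
    PySem.Int.mod (pvGm n mod j 0) mod = PySem.Int.mod (pvSig n mod j) mod := by
  rw [pv_gmdG n mod hm j 0, fwdDiff_iter_eq_sum_shift]
  congr 1
  unfold pvSig
  apply Finset.sum_congr rfl
  intro k _
  simp [smul_eq_mul, mul_one]

-- ===== VERDICT (by name: the statement is the Claim_ definition above) =====
theorem forward_differences_of_powers_spec : Claim_equal_forward_differences_of_powers := by
  intro n J mod _ hPre
  unfold Spec_forward_differences_of_powers
  rw [pv_Achar n J mod hPre.1, pv_Bchar n J mod hPre.2.1]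
  apply List.map_congr_left
  intro j _
  exact pv_bridge n mod hPre.2.1 j
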